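-- pv_equiv track=rewrite | github.com/vingamit/Coderun_2024_ML | Medium/551.Mark_accuracy/solution.py | cacl_similarity
-- ===== SOURCE A (Python) =====
-- from math import gcd
-- from typing import List, Tuple
-- from collections import defaultdict
--
-- def cacl_similarity(
--     n: int,
--     pseq: List[int],
--     vseq: List[int]
-- ) -> Tuple[int, int]:
--
--     q = n * (n - 1) // 2
--     p = q
--
--     p_count = defaultdict(int)
--     v_count = defaultdict(int)
--     pv_count = defaultdict(int)
--
--     for i in range(n):
--         p_class, v_class = pseq[i], vseq[i]
--
--         p -= p_count[p_class] - pv_count[(p_class, v_class)]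
--         p -= v_count[v_class] - pv_count[(p_class, v_class)]
--
--         p_count[p_class] += 1
--         v_count[v_class] += 1
--         pv_count[(p_class, v_class)] += 1
--
--     common = gcd(p, q)
--
--     return p // common, q // common
-- ===== SOURCE B (Python) =====
-- from math import gcd
-- from collections import Counter
--
--
-- def cacl_similarity(n, pseq, vseq):
--     q = n * (n - 1) // 2
--     pairs = [(pseq[i], vseq[i]) for i in range(n)]
--     p_count = Counter(a for a, _ in pairs)
--     v_count = Counter(b for _, b in pairs)
--     pv_count = Counter(pairs)
--
--     def comb2(counts):
--         return sum(k * (k - 1) // 2 for k in counts.values())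
--
--     p = q - comb2(p_count) - comb2(v_count) + 2 * comb2(pv_count)
--     common = gcd(p, q)
--     return p // common, q // common
-- ===== Notes on version B (the rewrite author's own statement) =====
-- stated objective: alternative
-- what changed: Replaces A's incremental loop that adjusts p per element using running defaultdict counts by a batch formulation: build three Counters (p-labels, v-labels, label pairs) and compute p from the closed-form combination sums q - sum C(k,2) over p_count - sum C(k,2) over v_count + 2*sum C(k,2) over pv_count, then reduce by gcd as before.
import Mathlib
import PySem

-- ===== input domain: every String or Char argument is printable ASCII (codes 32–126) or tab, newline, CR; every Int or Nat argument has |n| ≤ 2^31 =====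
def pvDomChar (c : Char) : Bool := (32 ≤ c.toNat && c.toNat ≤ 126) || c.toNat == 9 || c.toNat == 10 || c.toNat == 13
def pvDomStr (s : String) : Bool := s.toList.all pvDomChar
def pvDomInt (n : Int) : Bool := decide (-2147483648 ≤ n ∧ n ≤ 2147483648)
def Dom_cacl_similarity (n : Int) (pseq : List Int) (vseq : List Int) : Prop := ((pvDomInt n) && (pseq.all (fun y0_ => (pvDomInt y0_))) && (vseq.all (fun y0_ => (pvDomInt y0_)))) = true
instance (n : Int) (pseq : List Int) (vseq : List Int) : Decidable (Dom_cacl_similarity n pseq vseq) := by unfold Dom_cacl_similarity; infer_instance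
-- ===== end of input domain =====

-- ===== PORT A =====
-- B replaces A's incremental per-element pair bookkeeping by aggregate C(k,2) sums over
-- three Counters (same value everywhere; equal cost, different decomposition).

-- Port of A. `pseq[i]` / `vseq[i]` are ported as pyGetD … 0: Pre_ guarantees 0 ≤ i < length,
-- so the default is never read on admitted inputs (out of range Python raises IndexError).
def cacl_similarity (n : Int) (pseq : List Int) (vseq : List Int) : Int × Int :=
  let q := PySem.Int.floordiv (n * (n - 1)) 2
  let st := (PySem.List.pyRange 0 n).foldl
    (fun (st : Int × PySem.Dict Int Int × PySem.Dict Int Int × PySem.Dict (Int × Int) Int) i =>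
      let p_class := PySem.List.pyGetD pseq i 0
      let v_class := PySem.List.pyGetD vseq i 0
      let p := st.1 - (st.2.1.getD p_class 0 - st.2.2.2.getD (p_class, v_class) 0)
      let p := p - (st.2.2.1.getD v_class 0 - st.2.2.2.getD (p_class, v_class) 0)
      (p, st.2.1.insert p_class (st.2.1.getD p_class 0 + 1),
          st.2.2.1.insert v_class (st.2.2.1.getD v_class 0 + 1),
          st.2.2.2.insert (p_class, v_class) (st.2.2.2.getD (p_class, v_class) 0 + 1)))
    (q, PySem.Dict.empty, PySem.Dict.empty, PySem.Dict.empty)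
  let p := st.1
  let common : Int := Int.gcd p q
  (PySem.Int.floordiv p common, PySem.Int.floordiv q common)

-- ===== PORT B =====
-- Source B's helper comb2: sum of k*(k-1)//2 over the values of a Counter
def pvComb2 {kappa : Type} [BEq kappa] (d : PySem.Dict kappa Int) : Int :=
  d.values.foldl (fun s k => s + PySem.Int.floordiv (k * (k - 1)) 2) 0

def cacl_similarity_alt (n : Int) (pseq : List Int) (vseq : List Int) : Int × Int :=
  let q := PySem.Int.floordiv (n * (n - 1)) 2
  let pairs := (PySem.List.pyRange 0 n).map
    (fun i => (PySem.List.pyGetD pseq i 0, PySem.List.pyGetD vseq i 0))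
  let p_count := PySem.Dict.counter (pairs.map Prod.fst)
  let v_count := PySem.Dict.counter (pairs.map Prod.snd)
  let pv_count := PySem.Dict.counter pairs
  let p := q - pvComb2 p_count - pvComb2 v_count + 2 * pvComb2 pv_count
  let common : Int := Int.gcd p q
  (PySem.Int.floordiv p common, PySem.Int.floordiv q common)

-- ===== PRECONDITION & SPEC =====
-- Pre_ excludes exactly the inputs where the Python A raises: n = 0 or n = 1 give
-- q = 0 and p = 0, hence gcd 0 and a ZeroDivisionError (n = 1 with an empty pseq is an
-- IndexError instead), and n exceeding a sequence length is an IndexError.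
def Pre_cacl_similarity (n : Int) (pseq : List Int) (vseq : List Int) : Prop :=
  (n < 0 ∨ 2 ≤ n) ∧ n ≤ pseq.length ∧ n ≤ vseq.length
instance (n : Int) (pseq : List Int) (vseq : List Int) : Decidable (Pre_cacl_similarity n pseq vseq) := by unfold Pre_cacl_similarity; infer_instance

def pvWitness_cacl_similarity : Int × List Int × List Int := (2, [0, 1], [0, 0])

def Spec_cacl_similarity (n : Int) (pseq : List Int) (vseq : List Int) (out : Int × Int) : Prop := out = cacl_similarity_alt n pseq vseq
instance (n : Int) (pseq : List Int) (vseq : List Int) (out : Int × Int) : Decidable (Spec_cacl_similarity n pseq vseq out) := by unfold Spec_cacl_similarity; infer_instance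

-- ===== CLAIM (what is proved, stated in full; the proofs are below) =====
def Claim_equal_cacl_similarity : Prop := ∀ (n : Int) (pseq : List Int) (vseq : List Int), Dom_cacl_similarity n pseq vseq → Pre_cacl_similarity n pseq vseq → Spec_cacl_similarity n pseq vseq (cacl_similarity n pseq vseq)

-- ===== LEMMAS AND PROOFS =====

-- f c = c*(c-1)//2, the per-value summand of pvComb2
def pvF (c : Int) : Int := PySem.Int.floordiv (c * (c - 1)) 2

lemma pvF_succ (c : Int) : pvF (c + 1) = pvF c + c := by
  unfold pvF
  have h : (c + 1) * ((c + 1) - 1) = c * (c - 1) + c * 2 := by ring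
  rw [h, PySem.Int.floordiv_eq_ediv_of_pos (by norm_num),
      PySem.Int.floordiv_eq_ediv_of_pos (by norm_num),
      Int.add_mul_ediv_right _ _ (by norm_num : (2:Int) ≠ 0)]

-- "number of equal unordered pairs" of a list
def pvP {alpha : Type} [BEq alpha] : List alpha → Int
  | [] => 0
  | x :: t => (t.count x : Int) + pvP t

lemma pvP_append_singleton {alpha : Type} [BEq alpha] [LawfulBEq alpha] (xs : List alpha) (x : alpha) :
    pvP (xs ++ [x]) = pvP xs + xs.count x := by
  induction xs with
  | nil => simp [pvP]
  | cons y t ih =>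
    simp only [List.cons_append, pvP, ih, List.count_append, List.count_cons, List.count_nil]
    by_cases h : x = y
    · simp [h]; ring
    · simp [h, Ne.symm h]; ring

lemma pvCounter_append_singleton {alpha : Type} [BEq alpha] (xs : List alpha) (x : alpha) :
    PySem.Dict.counter (xs ++ [x])
      = (PySem.Dict.counter xs).insert x ((PySem.Dict.counter xs).getD x 0 + 1) := by
  rw [← PySem.Dict.foldl_insert_getD_add_one_eq_counter,
      ← PySem.Dict.foldl_insert_getD_add_one_eq_counter, List.foldl_append]
  simp

lemma pvSum_congr_except {alpha : Type} {S : List alpha} (hnd : S.Nodup) {x : alpha} (hx : x ∈ S)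
    (g g' : alpha → Int) (h : ∀ k ∈ S, k ≠ x → g' k = g k) :
    (S.map g').sum = (S.map g).sum + g' x - g x := by
  induction S with
  | nil => cases hx
  | cons y T ih =>
    rcases List.mem_cons.mp hx with rfl | hxT
    · have hT : ∀ k ∈ T, g' k = g k := fun k hk =>
        h k (List.mem_cons_of_mem _ hk) (fun he => (List.nodup_cons.mp hnd).1 (he ▸ hk))
      simp [List.map_congr_left hT]; ring
    · have hy : g' y = g y := h y (List.mem_cons_self) (fun he => (List.nodup_cons.mp hnd).1 (he ▸ hxT))
      have := ih (List.nodup_cons.mp hnd).2 hxT (fun k hk hke => h k (List.mem_cons_of_mem _ hk) hke)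
      simp [hy, this]; ring

lemma pvSum_counter {alpha : Type} [BEq alpha] [LawfulBEq alpha] (xs : List alpha) :
    ((PySem.Set.ofList xs).map (fun k => pvF ((xs.count k : Nat) : Int))).sum = pvP xs := by
  induction xs using List.reverseRecOn with
  | nil => simp [pvP]
  | append_singleton t x ih =>
    rw [pvP_append_singleton, PySem.Set.ofList_append_singleton]
    by_cases hx : x ∈ t
    · have hadd : (PySem.Set.ofList t).add x = PySem.Set.ofList t := by
        simp [PySem.Set.add, (PySem.Set.mem_ofList t x).mpr hx]
      rw [hadd,
        pvSum_congr_except (PySem.Set.nodup_ofList t) ((PySem.Set.mem_ofList t x).mpr hx)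
          (fun k => pvF ((t.count k : Nat) : Int))
          (fun k => pvF (((t ++ [x]).count k : Nat) : Int))
          (fun k _ hk => by simp [List.count_append, Ne.symm hk]),
        ih]
      simp [List.count_append, pvF_succ, Int.add_comm]
      ring
    · have hadd : (PySem.Set.ofList t).add x = PySem.Set.ofList t ++ [x] := by
        simp [PySem.Set.add, PySem.Set.mem_ofList, hx]
      have hcongr : ∀ k ∈ PySem.Set.ofList t,
          pvF (((t ++ [x]).count k : Nat) : Int) = pvF ((t.count k : Nat) : Int) := by
        intro k hk
        have hne : x ≠ k := fun he => hx (he ▸ (PySem.Set.mem_ofList t k).mp hk)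
        simp [List.count_append, hne]
      rw [hadd]
      simp only [List.map_append, List.map_cons, List.map_nil, List.sum_append,
        List.map_congr_left hcongr, ih]
      simp [List.count_append, List.count_eq_zero_of_not_mem hx, pvF]

lemma pvComb2_counter {alpha : Type} [BEq alpha] [LawfulBEq alpha] (xs : List alpha) :
    pvComb2 (PySem.Dict.counter xs) = pvP xs := by
  unfold pvComb2
  rw [PySem.List.foldl_add]
  have hv : (PySem.Dict.counter xs).values
      = (PySem.Set.ofList xs).map (fun k => ((xs.count k : Nat) : Int)) := by
    simp only [PySem.Dict.values, PySem.Dict.items_counter, List.map_map]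
    rfl
  rw [hv, List.map_map]
  simpa [Function.comp, pvF] using pvSum_counter xs

-- A's loop body, on the pair it reads at index i
def pvStepA (st : Int × PySem.Dict Int Int × PySem.Dict Int Int × PySem.Dict (Int × Int) Int)
    (x : Int × Int) :
    Int × PySem.Dict Int Int × PySem.Dict Int Int × PySem.Dict (Int × Int) Int :=
  let p := st.1 - (st.2.1.getD x.1 0 - st.2.2.2.getD (x.1, x.2) 0)
  let p := p - (st.2.2.1.getD x.2 0 - st.2.2.2.getD (x.1, x.2) 0)
  (p, st.2.1.insert x.1 (st.2.1.getD x.1 0 + 1),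
      st.2.2.1.insert x.2 (st.2.2.1.getD x.2 0 + 1),
      st.2.2.2.insert (x.1, x.2) (st.2.2.2.getD (x.1, x.2) 0 + 1))

lemma pvFoldA (L M : List (Int × Int)) (p0 : Int) :
    (L.foldl pvStepA
        (p0, PySem.Dict.counter (M.map Prod.fst), PySem.Dict.counter (M.map Prod.snd),
         PySem.Dict.counter M)).1
      = p0 - (pvP ((M ++ L).map Prod.fst) - pvP (M.map Prod.fst))
           - (pvP ((M ++ L).map Prod.snd) - pvP (M.map Prod.snd))
           + 2 * (pvP (M ++ L) - pvP M) := by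
  induction L generalizing M p0 with
  | nil => simp
  | cons x L ih =>
    have hstep : pvStepA
        (p0, PySem.Dict.counter (M.map Prod.fst), PySem.Dict.counter (M.map Prod.snd),
         PySem.Dict.counter M) x
      = (p0 - ((M.map Prod.fst).count x.1 - M.count x)
            - ((M.map Prod.snd).count x.2 - M.count x),
         PySem.Dict.counter ((M ++ [x]).map Prod.fst),
         PySem.Dict.counter ((M ++ [x]).map Prod.snd),
         PySem.Dict.counter (M ++ [x])) := by
      simp only [pvStepA, PySem.Dict.getD_counter, List.map_append, List.map_cons, List.map_nil,
        pvCounter_append_singleton, PySem.Dict.getD_counter]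
    rw [List.foldl_cons, hstep, ih (M ++ [x])]
    have h1 : M ++ x :: L = (M ++ [x]) ++ L := by simp
    rw [h1]
    simp only [List.map_append, List.map_cons, List.map_nil, pvP_append_singleton]
    ring

-- the two ports agree on every input (the preconditioned claim follows)
lemma pv_ports_eq (n : Int) (pseq : List Int) (vseq : List Int) :
    cacl_similarity n pseq vseq = cacl_similarity_alt n pseq vseq := by
  have hfold : (PySem.List.pyRange 0 n).foldl
      (fun (st : Int × PySem.Dict Int Int × PySem.Dict Int Int × PySem.Dict (Int × Int) Int) i =>
        let p_class := PySem.List.pyGetD pseq i 0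
        let v_class := PySem.List.pyGetD vseq i 0
        let p := st.1 - (st.2.1.getD p_class 0 - st.2.2.2.getD (p_class, v_class) 0)
        let p := p - (st.2.2.1.getD v_class 0 - st.2.2.2.getD (p_class, v_class) 0)
        (p, st.2.1.insert p_class (st.2.1.getD p_class 0 + 1),
            st.2.2.1.insert v_class (st.2.2.1.getD v_class 0 + 1),
            st.2.2.2.insert (p_class, v_class) (st.2.2.2.getD (p_class, v_class) 0 + 1)))
      (PySem.Int.floordiv (n * (n - 1)) 2, PySem.Dict.empty, PySem.Dict.empty, PySem.Dict.empty)
    = ((PySem.List.pyRange 0 n).map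
        (fun i => (PySem.List.pyGetD pseq i 0, PySem.List.pyGetD vseq i 0))).foldl pvStepA
      (PySem.Int.floordiv (n * (n - 1)) 2, PySem.Dict.empty, PySem.Dict.empty, PySem.Dict.empty) := by
    rw [List.foldl_map]
    rfl
  have hp : ∀ (L : List (Int × Int)) (q : Int),
      (List.foldl pvStepA (q, PySem.Dict.empty, PySem.Dict.empty, PySem.Dict.empty) L).1
      = q - pvComb2 (PySem.Dict.counter (L.map Prod.fst))
          - pvComb2 (PySem.Dict.counter (L.map Prod.snd))
          + 2 * pvComb2 (PySem.Dict.counter L) := by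
    intro L q
    rw [pvComb2_counter, pvComb2_counter, pvComb2_counter]
    have := pvFoldA L [] q
    simp only [List.nil_append, List.map_nil, pvP] at this
    rw [show PySem.Dict.counter ([] : List Int) = PySem.Dict.empty from rfl,
        show PySem.Dict.counter ([] : List (Int × Int)) = PySem.Dict.empty from rfl] at this
    rw [this]; ring
  simp only [cacl_similarity, cacl_similarity_alt]
  rw [hfold, hp]

-- ===== VERDICT (by name: the statement is the Claim_ definition above) =====
theorem cacl_similarity_spec : Claim_equal_cacl_similarity := by
  intro n pseq vseq _ _
  unfold Spec_cacl_similarity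
  exact pv_ports_eq n pseq vseq
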